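-- pv_equiv track=rewrite | github.com/noureddined/AdventOfCode2017 | day9/day9-1.py | maxDepth
-- ===== SOURCE A (Python) =====
-- def maxDepth(S):
--     current_max = 0
--     max = 0
--     boek = {}
--
--     # Traverse the input string
--     for i in range(len(S)):
--         if S[i] == '{':
--             current_max += 1
--             max = current_max
--             if max in boek:
--                 count = boek[max] + 1
--                 boek[max] = count
--             else:
--                 count = 1
--                 boek[max] = count
--
--         elif S[i] == '}':
--           current_max -= 1
--
--     #check for unbalanced string
--     if current_max != 0:
--         return -1
--
--     som = 0
--     for x in boek:
--         depth = x
--         aantal = boek[x]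
--         totaal = depth * aantal
--         som += totaal
--     return som
-- ===== SOURCE B (Python) =====
-- def maxDepth(S):
--     current = 0
--     som = 0
--     for c in S:
--         if c == '{':
--             current += 1
--             som += current
--         elif c == '}':
--             current -= 1
--     if current != 0:
--         return -1
--     return som
-- ===== Notes on version B (the rewrite author's own statement) =====
-- stated objective: simpler
-- what changed: Replaced the build-a-depth-histogram-dict-then-second-loop-reduce structure with one pass that adds the running brace depth to an accumulator at each opening brace.
import Mathlib
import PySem

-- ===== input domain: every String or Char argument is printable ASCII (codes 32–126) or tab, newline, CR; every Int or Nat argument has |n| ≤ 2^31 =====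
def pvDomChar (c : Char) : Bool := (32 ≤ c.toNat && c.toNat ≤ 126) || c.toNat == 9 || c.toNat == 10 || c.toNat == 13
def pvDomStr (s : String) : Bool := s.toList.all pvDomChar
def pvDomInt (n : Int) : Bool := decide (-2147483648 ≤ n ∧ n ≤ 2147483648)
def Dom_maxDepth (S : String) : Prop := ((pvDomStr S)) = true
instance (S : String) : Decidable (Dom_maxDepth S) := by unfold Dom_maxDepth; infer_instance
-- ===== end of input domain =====

-- B drops A's depth-histogram dict and second reducing loop: one pass adds the
-- running brace depth at each '{'.  Objective: simpler (no dict, no second loop).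

-- ===== PORT A =====
-- the body of A's first loop, on state (current_max, max, boek)
def maxDepthStepA (st : Int × Int × PySem.Dict Int Int) (c : Char) :
    Int × Int × PySem.Dict Int Int :=
  let current := st.1
  let mx := st.2.1
  let boek := st.2.2
  if c = '{' then
    let current := current + 1
    let mx := current
    if boek.contains mx then
      (current, mx, boek.insert mx (boek.getD mx 0 + 1))
    else
      (current, mx, boek.insert mx 1)
  else if c = '}' then
    (current - 1, mx, boek)
  else
    st

-- the code after A's first loop: the unbalanced check, then 'for x in boek: som += x*boek[x]'
-- (x ∈ boek, so boek[x] never raises: ported as getD x 0)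
def maxDepthFinishA (st : Int × Int × PySem.Dict Int Int) : Int :=
  if st.1 ≠ 0 then -1
  else st.2.2.keys.foldl (fun som x => som + x * st.2.2.getD x 0) 0

def maxDepth (S : String) : Int :=
  -- for i in range(len(S)): … S[i] …  (index always in range)
  maxDepthFinishA ((PySem.List.pyRange 0 (PySem.Str.len S) 1).foldl
    (fun st i => maxDepthStepA st (PySem.List.pyGetD S.toList i ' '))
    (0, 0, PySem.Dict.empty))

-- ===== PORT B =====
-- B's loop body, on state (current, som)
def maxDepthStepB (p : Int × Int) (c : Char) : Int × Int :=
  if c = '{' then (p.1 + 1, p.2 + (p.1 + 1))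
  else if c = '}' then (p.1 - 1, p.2)
  else p

def maxDepth_alt (S : String) : Int :=
  if (S.toList.foldl maxDepthStepB (0, 0)).1 ≠ 0 then -1
  else (S.toList.foldl maxDepthStepB (0, 0)).2

-- ===== PRECONDITION & SPEC =====
def Spec_maxDepth (S : String) (out : Int) : Prop := out = maxDepth_alt S
instance (S : String) (out : Int) : Decidable (Spec_maxDepth S out) := by unfold Spec_maxDepth; infer_instance

-- ===== CLAIM (what is proved, stated in full; the proofs are below) =====
def Claim_equal_maxDepth : Prop := ∀ (S : String), Dom_maxDepth S → Spec_maxDepth S (maxDepth S)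

-- ===== LEMMAS AND PROOFS =====

-- sum of key*value over a dict's items
def pvSumItems (d : PySem.Dict Int Int) : Int :=
  (d.items.map (fun p => p.1 * p.2)).sum

-- replacing the (unique) entry with key k, of value v, by (k, v+1) adds k to the item sum
lemma pv_sum_replace (l : List (Int × Int)) (k v : Int)
    (hnd : (l.map Prod.fst).Nodup)
    (hget : (PySem.Dict.mk l).get? k = some v) :
    ((l.map (fun p => if p.1 == k then (k, v + 1) else p)).map (fun p => p.1 * p.2)).sum
      = (l.map (fun p => p.1 * p.2)).sum + k := by
  induction l with
  | nil => simp [PySem.Dict.get?] at hget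
  | cons a t ih =>
    rw [PySem.Dict.get?_mk_cons] at hget
    simp only [List.map_cons, List.nodup_cons] at hnd
    by_cases hk : a.1 = k
    · have hv : a.2 = v := by simpa [hk] using hget
      have ht : t.map (fun p => if p.1 == k then (k, v + 1) else p) = t := by
        rw [show t.map (fun p => if p.1 == k then (k, v + 1) else p) = t.map id from
          List.map_congr_left ?_, List.map_id]
        intro p hp
        have hpk : p.1 ≠ k := by
          intro h
          exact hnd.1 (by rw [hk, ← h]; exact List.mem_map_of_mem hp)
        simp [hpk]
      simp only [List.map_cons, List.sum_cons, ht, hk, hv, beq_self_eq_true, if_pos]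
      ring
    · have hba : (a.1 == k) = false := by simp [hk]
      simp only [hba] at hget
      simp only [hba, Bool.false_eq_true, if_false, List.map_cons, List.sum_cons]
      rw [ih hnd.2 hget]
      ring

lemma pv_sumItems_insert (d : PySem.Dict Int Int) (k : Int)
    (hnd : d.keys.Nodup) :
    pvSumItems (d.insert k (d.getD k 0 + 1)) = pvSumItems d + k := by
  by_cases hc : d.contains k
  · rw [pvSumItems, PySem.Dict.items_insert_of_contains d _ hc]
    have h1 : (d.get? k).isSome := by rw [← PySem.Dict.contains_eq_isSome_get?]; exact hc
    obtain ⟨v, hv⟩ := Option.isSome_iff_exists.mp h1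
    have hsome : d.get? k = some (d.getD k 0) := by
      rw [PySem.Dict.getD_eq_get?_getD, hv]; rfl
    exact pv_sum_replace d.items k (d.getD k 0)
      (by simpa [PySem.Dict.keys] using hnd) (by cases d; exact hsome)
  · have hc' : d.contains k = false := by simpa using hc
    rw [pvSumItems, PySem.Dict.items_insert_of_not_contains d _ hc',
        PySem.Dict.getD_of_not_contains d 0 hc']
    simp [pvSumItems]

-- the two '{'-branches of A are one and the same counter update
lemma pv_stepA_open (st : Int × Int × PySem.Dict Int Int) :
    maxDepthStepA st '{'
      = (st.1 + 1, st.1 + 1, st.2.2.insert (st.1 + 1) (st.2.2.getD (st.1 + 1) 0 + 1)) := by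
  unfold maxDepthStepA
  by_cases hc : st.2.2.contains (st.1 + 1)
  · simp [hc]
  · have hc' : st.2.2.contains (st.1 + 1) = false := by simpa using hc
    rw [PySem.Dict.getD_of_not_contains st.2.2 0 hc']
    simp [hc']

-- main loop invariant: A's (current, boek) tracks B's (current, som)
lemma pv_loop_inv (cs : List Char) (cur mx som : Int) (d : PySem.Dict Int Int)
    (hnd : d.keys.Nodup) (hsum : pvSumItems d = som) :
    (cs.foldl maxDepthStepA (cur, mx, d)).1 = (cs.foldl maxDepthStepB (cur, som)).1 ∧
    (cs.foldl maxDepthStepA (cur, mx, d)).2.2.keys.Nodup ∧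
    pvSumItems (cs.foldl maxDepthStepA (cur, mx, d)).2.2 = (cs.foldl maxDepthStepB (cur, som)).2 := by
  induction cs generalizing cur mx som d with
  | nil => exact ⟨rfl, hnd, hsum⟩
  | cons c t ih =>
    by_cases h1 : c = '{'
    · subst h1
      simp only [List.foldl_cons, pv_stepA_open, maxDepthStepB]
      exact ih (cur + 1) (cur + 1) (som + (cur + 1)) _
        (PySem.Dict.nodup_keys_insert _ _ _ hnd)
        (by rw [pv_sumItems_insert d (cur + 1) hnd, hsum])
    · by_cases h2 : c = '}'
      · subst h2
        simp only [List.foldl_cons, maxDepthStepA, maxDepthStepB, if_neg h1]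
        exact ih (cur - 1) mx som d hnd hsum
      · simp only [List.foldl_cons, maxDepthStepA, maxDepthStepB, if_neg h1, if_neg h2]
        exact ih cur mx som d hnd hsum

-- foldl-accumulate is the sum of the mapped list
lemma pv_foldl_sum (l : List Int) (f : Int → Int) (s0 : Int) :
    l.foldl (fun s x => s + f x) s0 = s0 + (l.map f).sum := by
  induction l generalizing s0 with
  | nil => simp
  | cons a t ih => simp [List.foldl_cons, ih (s0 + f a)]; ring

-- A's second loop computes pvSumItems, given nodup keys
lemma pv_keys_foldl (d : PySem.Dict Int Int) (hnd : d.keys.Nodup) :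
    d.keys.foldl (fun som x => som + x * d.getD x 0) 0 = pvSumItems d := by
  rw [pv_foldl_sum, pvSumItems, PySem.Dict.items_eq_map_keys d hnd 0, List.map_map]
  simp only [zero_add]
  rfl

-- ===== VERDICT (by name: the statement is the Claim_ definition above) =====
theorem maxDepth_spec : Claim_equal_maxDepth := by
  intro S _
  unfold Spec_maxDepth maxDepth maxDepth_alt
  rw [PySem.Str.len_eq,
      PySem.List.foldl_pyRange_zero_pyGetD' S.toList ' ' maxDepthStepA (0, 0, PySem.Dict.empty)]
  obtain ⟨h1, hnd, h3⟩ := pv_loop_inv S.toList 0 0 0 PySem.Dict.empty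
    PySem.Dict.nodup_keys_empty (by rfl)
  unfold maxDepthFinishA
  rw [h1]
  split_ifs with h
  · rfl
  · rw [pv_keys_foldl _ hnd, h3]
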